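-- pv_equiv track=rewrite | github.com/Aholicy/hw_interface_analyze | interface_test/test_c/new_dependency.py | collect_includes
-- ===== SOURCE A (Python) =====
-- def collect_includes(module_name, parsed_data, checked_modules=None):
--     """递归收集所有include的模块名"""
--     if checked_modules is None:
--         checked_modules = set()
--
--     checked_modules.add(module_name)
--     includes = parsed_data.get(module_name, {}).get('includes', [])
--     all_includes = set(includes)  # 保存当前模块的所有includes
--
--     for include in includes:
--         # 对于每个include，递归查找
--         if include not in checked_modules:
--             checked_modules.add(include)
--             # 如果该include的模块存在，递归获取该模块的includes
--             if include in parsed_data: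
--                 all_includes.update(collect_includes(include, parsed_data, checked_modules))
--
--     return all_includes
-- ===== SOURCE B (Python) =====
-- def collect_includes(module_name, parsed_data, checked_modules=None):
--     """Iterative version: explicit stack of pending include lists instead of recursion.
--     Performs the same mutation of checked_modules as the recursive original."""
--     if checked_modules is None:
--         checked_modules = set()
--     checked_modules.add(module_name)
--     includes = parsed_data.get(module_name, {}).get('includes', [])
--     result = set(includes)
--     stack = [list(includes)]
--     while stack:
--         pending = stack[-1]
--         if not pending:
--             stack.pop()
--             continue
--         inc = pending.pop(0)
--         if inc not in checked_modules:
--             checked_modules.add(inc)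
--             if inc in parsed_data:
--                 child = parsed_data[inc].get('includes', [])
--                 result.update(child)
--                 stack.append(list(child))
--     return result
-- ===== Notes on version B (the rewrite author's own statement) =====
-- stated objective: alternative
-- what changed: Replaces A's recursive descent with an iterative explicit-stack worklist: a stack of pending include lists is expanded in a loop, with the same visited-set pruning and the same mutation of checked_modules.
import Mathlib
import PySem

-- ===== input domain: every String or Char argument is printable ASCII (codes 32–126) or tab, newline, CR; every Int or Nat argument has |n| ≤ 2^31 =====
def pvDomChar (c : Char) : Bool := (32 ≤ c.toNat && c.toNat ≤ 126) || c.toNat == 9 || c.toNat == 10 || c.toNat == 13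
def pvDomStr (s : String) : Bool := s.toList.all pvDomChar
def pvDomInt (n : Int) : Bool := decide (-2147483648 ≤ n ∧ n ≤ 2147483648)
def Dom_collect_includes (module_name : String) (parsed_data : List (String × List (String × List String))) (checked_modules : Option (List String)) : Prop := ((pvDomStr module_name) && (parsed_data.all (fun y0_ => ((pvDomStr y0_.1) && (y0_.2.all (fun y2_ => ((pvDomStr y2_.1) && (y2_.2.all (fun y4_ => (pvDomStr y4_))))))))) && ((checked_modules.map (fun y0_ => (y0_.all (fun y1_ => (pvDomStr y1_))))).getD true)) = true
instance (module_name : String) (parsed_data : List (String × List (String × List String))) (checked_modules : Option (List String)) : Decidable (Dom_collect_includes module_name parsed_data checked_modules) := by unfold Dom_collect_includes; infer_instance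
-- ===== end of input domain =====

-- ===== PORT A =====
-- B changes the decomposition: A's recursion becomes an explicit-stack worklist in B; the proved
-- equivalence is about the return value (in Python both perform the identical mutation of checked_modules).
-- Helpers shared by the termination arguments: pvMu counts parsed_data keys not yet checked.
def pvMu (pd : List (String × List (String × List String))) (c : PySem.Set String) : Nat :=
  ((pd.map Prod.fst).filter (fun k => !(PySem.Set.contains c k))).length

def pvNu (stack : List (List String)) : Nat :=
  (stack.map List.length).sum + stack.length

theorem pvLenFilterMono {α : Type} (p q : α → Bool) (h : ∀ a, p a = true → q a = true) :
    ∀ l : List α, (l.filter p).length ≤ (l.filter q).length := by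
  intro l
  induction l with
  | nil => simp
  | cons x xs ih =>
    simp only [List.filter_cons]
    cases hp : p x with
    | true => simp [h x hp]; omega
    | false => cases hq : q x <;> simp <;> omega

theorem pvLenFilterLt {α : Type} (p q : α → Bool) (h : ∀ a, p a = true → q a = true)
    {x : α} {l : List α} (hm : x ∈ l) (hq : q x = true) (hp : p x = false) :
    (l.filter p).length < (l.filter q).length := by
  induction l with
  | nil => cases hm
  | cons y ys ih =>
    simp only [List.filter_cons]
    rcases List.mem_cons.1 hm with rfl | hmem
    · have := pvLenFilterMono p q h ys
      simp [hp, hq]; omega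
    · cases hpy : p y with
      | true => have := ih hmem; simp [h y hpy]; omega
      | false => have := ih hmem; cases hqy : q y <;> simp <;> omega

theorem pvMu_add_le (pd : List (String × List (String × List String))) (c : PySem.Set String)
    (x : String) : pvMu pd (PySem.Set.add c x) ≤ pvMu pd c := by
  apply pvLenFilterMono
  intro a ha
  cases hc : PySem.Set.contains c a with
  | true =>
    exfalso
    have hmem : a ∈ PySem.Set.add c x := (PySem.Set.mem_add c x a).2 (Or.inl ((PySem.Set.contains_iff c a).1 hc))
    rw [(PySem.Set.contains_iff _ a).2 hmem] at ha
    simp at ha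
  | false => simp

theorem pvMu_add_lt (pd : List (String × List (String × List String))) {c : PySem.Set String}
    {x : String} (hx : PySem.Set.contains c x = false)
    (hk : PySem.Dict.contains (PySem.Dict.mk pd) x = true) :
    pvMu pd (PySem.Set.add c x) < pvMu pd c := by
  have hxmem : x ∈ pd.map Prod.fst := by
    rw [PySem.Dict.contains_eq_decide_mem_keys, PySem.Dict.keys_mk, decide_eq_true_iff] at hk
    exact hk
  apply pvLenFilterLt
  · intro a ha
    cases hc : PySem.Set.contains c a with
    | true =>
      exfalso
      have hmem : a ∈ PySem.Set.add c x := (PySem.Set.mem_add c x a).2 (Or.inl ((PySem.Set.contains_iff c a).1 hc))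
      rw [(PySem.Set.contains_iff _ a).2 hmem] at ha
      simp at ha
    | false => simp
  · exact hxmem
  · simp
    exact fun h => by rw [(PySem.Set.contains_iff c x).2 h] at hx; cases hx
  · simp

-- Port of A: the recursion, with a Nat fuel as a pure totality guard (collect_includes supplies
-- pd.length + 1, which the proofs show is never exhausted).
mutual
def pvCoreA (fuel : Nat) (pd : List (String × List (String × List String)))
    (name : String) (checked : PySem.Set String) : PySem.Set String × PySem.Set String :=
  let checked := PySem.Set.add checked name
  let includes := PySem.Dict.getD (PySem.Dict.mk (PySem.Dict.getD (PySem.Dict.mk pd) name [])) "includes" []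
  pvLoopA fuel pd includes checked (PySem.Set.ofList includes)
termination_by (fuel, 1, 0)
def pvLoopA (fuel : Nat) (pd : List (String × List (String × List String)))
    (includes : List String) (checked all : PySem.Set String) : PySem.Set String × PySem.Set String :=
  match includes with
  | [] => (all, checked)
  | inc :: rest =>
    if PySem.Set.contains checked inc then pvLoopA fuel pd rest checked all
    else
      let checked := PySem.Set.add checked inc
      if PySem.Dict.contains (PySem.Dict.mk pd) inc then
        match fuel with
        | 0 => (all, checked)   -- fuel guard, unreachable from collect_includes
        | f + 1 =>
          let r := pvCoreA f pd inc checked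
          pvLoopA (f + 1) pd rest r.2 (PySem.Set.update all r.1)
      else pvLoopA fuel pd rest checked all
termination_by (fuel, 0, includes.length)
end

def collect_includes (module_name : String) (parsed_data : List (String × List (String × List String))) (checked_modules : Option (List String)) : List String :=
  let checked : PySem.Set String := match checked_modules with
    | none => PySem.Set.empty
    | some s => s
  (pvCoreA (parsed_data.length + 1) parsed_data module_name checked).1

-- ===== PORT B =====
-- Port of B: iterative worklist, an explicit stack of pending include lists.
def pvLoopB (pd : List (String × List (String × List String))) (stack : List (List String))
    (checked result : PySem.Set String) : PySem.Set String × PySem.Set String :=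
  match stack with
  | [] => (result, checked)
  | pending :: stackRest =>
    match pending with
    | [] => pvLoopB pd stackRest checked result
    | inc :: pend =>
      if PySem.Set.contains checked inc then pvLoopB pd (pend :: stackRest) checked result
      else
        let checked' := PySem.Set.add checked inc
        if PySem.Dict.contains (PySem.Dict.mk pd) inc then
          let child := PySem.Dict.getD (PySem.Dict.mk (PySem.Dict.getD (PySem.Dict.mk pd) inc [])) "includes" []
          pvLoopB pd (child :: pend :: stackRest) checked' (PySem.Set.update result child)
        else pvLoopB pd (pend :: stackRest) checked' result
termination_by (pvMu pd checked, pvNu stack)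
decreasing_by
  · apply Prod.Lex.right
    simp [pvNu]
  · apply Prod.Lex.right
    simp [pvNu]
  · rename_i hc hk
    simp only [Bool.not_eq_true] at hc
    exact Prod.Lex.left _ _ (pvMu_add_lt pd hc hk)
  · rename_i hc
    simp only [Bool.not_eq_true] at hc
    rcases Nat.lt_or_eq_of_le (pvMu_add_le pd checked inc) with h | h
    · exact Prod.Lex.left _ _ h
    · rw [h]
      apply Prod.Lex.right
      simp [pvNu]

def collect_includes_alt (module_name : String) (parsed_data : List (String × List (String × List String))) (checked_modules : Option (List String)) : List String :=
  let checked : PySem.Set String := match checked_modules with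
    | none => PySem.Set.empty
    | some s => s
  let checked := PySem.Set.add checked module_name
  let includes := PySem.Dict.getD (PySem.Dict.mk (PySem.Dict.getD (PySem.Dict.mk parsed_data) module_name [])) "includes" []
  (pvLoopB parsed_data [includes] checked (PySem.Set.ofList includes)).1


-- ===== PRECONDITION & SPEC =====
-- (A is total on its domain — no lookup can fail and the recursion always terminates — so no Pre_.)
def Spec_collect_includes (module_name : String) (parsed_data : List (String × List (String × List String))) (checked_modules : Option (List String)) (out : List String) : Prop := out = collect_includes_alt module_name parsed_data checked_modules
instance (module_name : String) (parsed_data : List (String × List (String × List String))) (checked_modules : Option (List String)) (out : List String) : Decidable (Spec_collect_includes module_name parsed_data checked_modules out) := by unfold Spec_collect_includes; infer_instance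

-- ===== CLAIM (what is proved, stated in full; the proofs are below) =====
def Claim_equal_collect_includes : Prop := ∀ (module_name : String) (parsed_data : List (String × List (String × List String))) (checked_modules : Option (List String)), Dom_collect_includes module_name parsed_data checked_modules → Spec_collect_includes module_name parsed_data checked_modules (collect_includes module_name parsed_data checked_modules)

-- ===== LEMMAS AND PROOFS =====
-- A set-update associativity fact specific to the shapes these two loops build.
theorem pvAddUpdate (s b : PySem.Set String) (x : String) :
    PySem.Set.add (PySem.Set.update s b) x = PySem.Set.update s (PySem.Set.add b x) := by
  by_cases hx : x ∈ b
  · rw [PySem.Set.add_of_mem hx, PySem.Set.add_of_mem ((PySem.Set.mem_update s b x).2 (Or.inr hx))]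
  · rw [PySem.Set.add_of_not_mem hx, PySem.Set.update_append]
    rfl

theorem pvUpdateAssoc (s : PySem.Set String) : ∀ (c : List String) (b : PySem.Set String),
    PySem.Set.update (PySem.Set.update s b) c = PySem.Set.update s (PySem.Set.update b c) := by
  intro c
  induction c with
  | nil => intro b; rfl
  | cons x xs ih =>
    intro b
    rw [PySem.Set.update_cons, PySem.Set.update_cons, pvAddUpdate, ih]

theorem pvUpdateOfList (s : PySem.Set String) (c : List String) :
    PySem.Set.update s (PySem.Set.ofList c) = PySem.Set.update s c := by
  rw [← PySem.Set.update_nil_left]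
  exact (pvUpdateAssoc s c []).symm

-- checked_modules only grows along A's loop.
theorem pvLoopA_mono : ∀ (fuel : Nat) (pd : List (String × List (String × List String)))
    (l : List String) (c a : PySem.Set String) (x : String),
    x ∈ c → x ∈ (pvLoopA fuel pd l c a).2 := by
  intro fuel
  induction fuel with
  | zero =>
    intro pd l
    induction l with
    | nil => intro c a x hx; simpa [pvLoopA] using hx
    | cons inc rest ih =>
      intro c a x hx
      rw [pvLoopA]
      split
      · exact ih _ _ _ hx
      · split
        · exact (PySem.Set.mem_add _ _ _).2 (Or.inl hx)
        · exact ih _ _ _ ((PySem.Set.mem_add _ _ _).2 (Or.inl hx))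
  | succ n ihf =>
    intro pd l
    induction l with
    | nil => intro c a x hx; simpa [pvLoopA] using hx
    | cons inc rest ih =>
      intro c a x hx
      rw [pvLoopA]
      split
      · exact ih _ _ _ hx
      · split
        · apply ih
          simp only [pvCoreA]
          exact ihf pd _ _ _ x ((PySem.Set.mem_add _ _ _).2 (Or.inl ((PySem.Set.mem_add _ _ _).2 (Or.inl hx))))
        · exact ih _ _ _ ((PySem.Set.mem_add _ _ _).2 (Or.inl hx))

theorem pvMu_loopA_le (fuel : Nat) (pd : List (String × List (String × List String)))
    (l : List String) (c a : PySem.Set String) :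
    pvMu pd (pvLoopA fuel pd l c a).2 ≤ pvMu pd c := by
  apply pvLenFilterMono
  intro k hk
  cases hc : PySem.Set.contains c k with
  | true =>
    exfalso
    have hmem : k ∈ (pvLoopA fuel pd l c a).2 :=
      pvLoopA_mono fuel pd l c a k ((PySem.Set.contains_iff c k).1 hc)
    rw [(PySem.Set.contains_iff _ k).2 hmem] at hk
    simp at hk
  | false => simp

-- A's accumulator is only ever unioned into: it commutes with a pre-applied update.
theorem pvLoopA_param : ∀ (fuel : Nat) (pd : List (String × List (String × List String)))
    (l : List String) (c : PySem.Set String) (b : PySem.Set String) (a : PySem.Set String),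
    pvLoopA fuel pd l c (PySem.Set.update a b)
      = (PySem.Set.update a (pvLoopA fuel pd l c b).1, (pvLoopA fuel pd l c b).2) := by
  intro fuel pd l
  induction l with
  | nil => intro c b a; simp [pvLoopA]
  | cons inc rest ih =>
    intro c b a
    rw [pvLoopA]
    conv_rhs => rw [pvLoopA]
    split
    · exact ih _ _ _
    · split
      · cases fuel with
        | zero => simp
        | succ f =>
          simp only
          rw [pvUpdateAssoc a _ b]
          exact ih _ _ _
      · exact ih _ _ _

-- Simulation: one stack frame of B runs exactly one call of A's loop.
theorem pvSim : ∀ (fuel : Nat) (pd : List (String × List (String × List String)))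
    (l : List String) (c r : PySem.Set String) (S : List (List String)),
    pvMu pd c < fuel →
    pvLoopB pd (l :: S) c r
      = pvLoopB pd S (pvLoopA fuel pd l c r).2 (pvLoopA fuel pd l c r).1 := by
  intro fuel
  induction fuel with
  | zero => intro pd l c r S h; omega
  | succ n ihf =>
    intro pd l
    induction l with
    | nil =>
      intro c r S hmu
      rw [pvLoopB, pvLoopA]
    | cons inc rest ih =>
      intro c r S hmu
      rw [pvLoopB]
      conv_rhs => rw [pvLoopA]
      split
      · exact ih _ _ _ hmu
      · rename_i hc
        split
        · rename_i hk
          simp only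
          have hc' : PySem.Set.contains c inc = false := by simpa using hc
          have h1 := pvMu_add_lt pd hc' hk
          simp only [pvCoreA]
          rw [PySem.Set.add_of_mem ((PySem.Set.mem_add c inc inc).2 (Or.inr rfl))]
          rw [ihf pd _ _ _ _ (by omega : pvMu pd (PySem.Set.add c inc) < n)]
          rw [← pvUpdateOfList r (PySem.Dict.getD (PySem.Dict.mk (PySem.Dict.getD (PySem.Dict.mk pd) inc [])) "includes" [])]
          rw [pvLoopA_param n pd _ (PySem.Set.add c inc) (PySem.Set.ofList _) r]
          dsimp only
          apply ih
          have h2 := pvMu_loopA_le n pd (PySem.Dict.getD (PySem.Dict.mk (PySem.Dict.getD (PySem.Dict.mk pd) inc [])) "includes" []) (PySem.Set.add c inc) (PySem.Set.ofList (PySem.Dict.getD (PySem.Dict.mk (PySem.Dict.getD (PySem.Dict.mk pd) inc [])) "includes" []))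
          omega
        · exact ih _ _ _ (by have := pvMu_add_le pd c inc; omega)


-- ===== VERDICT (by name: the statement is the Claim_ definition above) =====
theorem collect_includes_spec : Claim_equal_collect_includes := by
  intro m pd ch _dom
  unfold Spec_collect_includes collect_includes collect_includes_alt
  simp only [pvCoreA]
  rw [pvSim (pd.length + 1) pd _ _ _ [] (by
      have h1 := List.length_filter_le (fun k => !(PySem.Set.contains (PySem.Set.add (match ch with | none => PySem.Set.empty | some s => s) m) k)) (pd.map Prod.fst)
      simp only [List.length_map] at h1
      unfold pvMu
      omega)]
  rw [pvLoopB]
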